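-- pv_equiv track=rewrite | github.com/TomasKazimir/GameOfLife-pygame | logic.py | format_text_to_rule
-- ===== SOURCE A (Python) =====
-- def format_text_to_rule(text: str) -> str:
--     """
--     Converts given string to rule format.
--     Format looks like this:
--             +-- dividing slash for clarity
--             |
--            / \
--     >>  R1/B3/S23  <<
--         |  |  |
--         |  |  +--> S: how many neighbours are required for a live cell to remain alive - followed by a list of integers
--         |  +--> B: how many neighbours are required for a dead cell to become alive - followed by a list integer
--         +--> R: radius in which cells are considered neighbours - followed by a single integer (single integer not enforced)
--
--     :param text: string to be converted
--     :return: formatted rule string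
--     """
--     out = ""
--     for char in text:
--         char = char.upper()
--         if char.isdigit():
--             out += char
--         elif char in "RBS" and char not in out:
--             out += "/" + char
--
--     if len(out) > 0 and out[0] == "/":
--         out = out[1:]
--
--     return out
-- ===== SOURCE B (Python) =====
-- def format_text_to_rule(text: str) -> str:
--     s = text.upper()
--     kept = [c for i, c in enumerate(s)
--             if c.isdigit() or (c in "RBS" and s.index(c) == i)]
--     return "".join("/" + c if i > 0 and c in "RBS" else c
--                    for i, c in enumerate(kept))
-- ===== Notes on version B (the rewrite author's own statement) =====
-- stated objective: alternative
-- what changed: B is two staged comprehensions over the uppercased text: first a filter keeps digits and each R/B/S letter only at its first occurrence (detected by s.index(c)==i, no seen-state and no output-membership scan), then a join inserts a slash before every non-initial letter by position, replacing A's stateful append-slash-then-strip-leading-slash loop.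
import Mathlib
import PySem

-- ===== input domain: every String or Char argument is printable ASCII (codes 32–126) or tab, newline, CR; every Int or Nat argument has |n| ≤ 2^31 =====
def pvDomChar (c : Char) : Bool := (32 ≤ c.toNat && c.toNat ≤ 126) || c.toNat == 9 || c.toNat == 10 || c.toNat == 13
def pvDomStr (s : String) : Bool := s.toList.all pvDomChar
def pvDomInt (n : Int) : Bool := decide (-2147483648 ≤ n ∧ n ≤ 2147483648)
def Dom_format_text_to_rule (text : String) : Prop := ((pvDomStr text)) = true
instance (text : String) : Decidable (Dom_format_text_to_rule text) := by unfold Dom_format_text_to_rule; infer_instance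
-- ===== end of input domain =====

-- B replaces A's stateful append-with-slash loop + leading-slash strip by two staged
-- comprehensions: a filter keeping digits and each R/B/S letter at its first occurrence
-- (s.index(c) == i), then a positional join that puts a slash before every non-initial letter.


-- ===== PORT A =====
-- out += char / out += "/" + char; 'char in "RBS"' and 'char not in out' via PySem.Chars.isIn
def fmtA_loop (out : List Char) : List Char → List Char
  | [] => out
  | c :: cs =>
    let ch := PySem.Chars.upperChar c
    if PySem.Chars.isdigit ch then fmtA_loop (out ++ [ch]) cs
    else if PySem.Chars.isIn [ch] ['R', 'B', 'S'] && !(PySem.Chars.isIn [ch] out) then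
      fmtA_loop (out ++ ['/', ch]) cs
    else fmtA_loop out cs

def format_text_to_rule (text : String) : String :=
  let out := fmtA_loop [] text.toList
  -- out[0] == "/" as pyGet?, out[1:] as slice — exact
  let out2 := if 0 < out.length && (PySem.List.pyGet? out 0 == some '/')
              then PySem.List.slice out (some 1) none else out
  String.ofList out2

-- ===== PORT B =====
-- s = text.upper(); kept = [c for i,c in enumerate(s) if c.isdigit() or (c in "RBS" and s.index(c)==i)];
-- "".join("/"+c if i>0 and c in "RBS" else c for i,c in enumerate(kept))
def format_text_to_rule_alt (text : String) : String :=
  let s := (PySem.Str.upper text).toList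
  let kept := ((PySem.List.enumerate s).filter (fun p =>
      PySem.Chars.isdigit p.2 ||
        (PySem.Chars.isIn [p.2] ['R', 'B', 'S'] &&
          ((PySem.List.index? s p.2).map (fun n => (n : Int)) == some p.1)))).map (fun p => p.2)
  String.ofList ((PySem.List.enumerate kept).flatMap (fun p =>
    if 0 < p.1 && PySem.Chars.isIn [p.2] ['R', 'B', 'S'] then '/' :: [p.2] else [p.2]))

-- ===== PRECONDITION & SPEC =====
def Spec_format_text_to_rule (text : String) (out : String) : Prop := out = format_text_to_rule_alt text
instance (text : String) (out : String) : Decidable (Spec_format_text_to_rule text out) := by unfold Spec_format_text_to_rule; infer_instance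

-- ===== CLAIM (what is proved, stated in full; the proofs are below) =====
def Claim_equal_format_text_to_rule : Prop := ∀ (text : String), Dom_format_text_to_rule text → Spec_format_text_to_rule text (format_text_to_rule text)

-- ===== LEMMAS AND PROOFS =====

-- common intermediate: the kept characters, computed left-to-right with a seen accumulator
def pvKept (seen : List Char) : List Char → List Char
  | [] => []
  | c :: cs =>
    if PySem.Chars.isdigit c then c :: pvKept seen cs
    else if PySem.Chars.isIn [c] ['R', 'B', 'S'] && !(decide (c ∈ seen)) then
      c :: pvKept (c :: seen) cs
    else pvKept seen cs

-- A's per-kept-char rendering (slash before every letter)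
def pvF (c : Char) : List Char :=
  if PySem.Chars.isIn [c] ['R', 'B', 'S'] then ['/', c] else [c]

lemma isIn_singleton (c : Char) (s : List Char) : PySem.Chars.isIn [c] s = true ↔ c ∈ s := by
  rw [PySem.Chars.isIn_iff_infix]; exact List.singleton_infix_iff c s

lemma isdigit_not_rbs (c : Char) (h : PySem.Chars.isdigit c = true) :
    ¬ (c = 'R' ∨ c = 'B' ∨ c = 'S') := by
  rintro (rfl | rfl | rfl) <;> simp [PySem.Chars.isdigit] at h

-- A's loop emits exactly pvF of the kept chars
lemma fmtA_loop_eq (cs : List Char) :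
    ∀ out seen, (∀ c, (c = 'R' ∨ c = 'B' ∨ c = 'S') → (c ∈ out ↔ c ∈ seen)) →
    fmtA_loop out cs = out ++ (pvKept seen (cs.map PySem.Chars.upperChar)).flatMap pvF := by
  induction cs with
  | nil => intro out seen _; simp [fmtA_loop, pvKept]
  | cons c cs ih =>
    intro out seen hinv
    obtain ⟨ch, hch⟩ : ∃ u, u = PySem.Chars.upperChar c := ⟨_, rfl⟩
    by_cases hd : PySem.Chars.isdigit ch = true
    · have hnrbs : PySem.Chars.isIn [ch] ['R', 'B', 'S'] = false := by
        rw [Bool.eq_false_iff]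
        intro h
        exact isdigit_not_rbs ch hd (by simpa using (isIn_singleton ch _).mp h)
      rw [show fmtA_loop out (c :: cs) = fmtA_loop (out ++ [ch]) cs by
            simp [fmtA_loop, ← hch, hd],
          show (c :: cs).map PySem.Chars.upperChar = ch :: cs.map PySem.Chars.upperChar by
            simp [hch],
          show pvKept seen (ch :: cs.map PySem.Chars.upperChar)
              = ch :: pvKept seen (cs.map PySem.Chars.upperChar) by
            simp [pvKept, hd]]
      rw [ih (out ++ [ch]) seen (by
        intro d hdR
        have : d ≠ ch := by rintro rfl; exact isdigit_not_rbs d hd hdR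
        simp [this, hinv d hdR])]
      simp [List.flatMap_cons, pvF, hnrbs]
    · by_cases hr : PySem.Chars.isIn [ch] ['R', 'B', 'S'] = true
      · have hrbs : ch = 'R' ∨ ch = 'B' ∨ ch = 'S' := by
          simpa using (isIn_singleton ch _).mp hr
        by_cases hs : ch ∈ seen
        · have hout : ch ∈ out := (hinv ch hrbs).mpr hs
          rw [show fmtA_loop out (c :: cs) = fmtA_loop out cs by
                simp only [fmtA_loop, ← hch]
                rw [if_neg (by simp_all), if_neg (by
                  simp [hr, (isIn_singleton ch out).mpr hout])],
              show (c :: cs).map PySem.Chars.upperChar = ch :: cs.map PySem.Chars.upperChar by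
                simp [hch],
              show pvKept seen (ch :: cs.map PySem.Chars.upperChar)
                  = pvKept seen (cs.map PySem.Chars.upperChar) by
                simp [pvKept, hd, hs]]
          exact ih out seen hinv
        · have hout : ch ∉ out := fun h => hs ((hinv ch hrbs).mp h)
          have hinB : PySem.Chars.isIn [ch] out = false := by
            rw [Bool.eq_false_iff]; intro h; exact hout ((isIn_singleton ch out).mp h)
          rw [show fmtA_loop out (c :: cs) = fmtA_loop (out ++ ['/', ch]) cs by
                simp only [fmtA_loop, ← hch]
                rw [if_neg (by simp_all), if_pos (by simp [hr, hinB])],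
              show (c :: cs).map PySem.Chars.upperChar = ch :: cs.map PySem.Chars.upperChar by
                simp [hch],
              show pvKept seen (ch :: cs.map PySem.Chars.upperChar)
                  = ch :: pvKept (ch :: seen) (cs.map PySem.Chars.upperChar) by
                simp [pvKept, hd, hr, hs]]
          rw [ih (out ++ ['/', ch]) (ch :: seen) (by
            intro d hdR
            have hds : d ≠ '/' := by rcases hdR with rfl | rfl | rfl <;> decide
            by_cases hdc : d = ch
            · subst hdc; simp
            · simp [hds, hdc, hinv d hdR])]
          simp [List.flatMap_cons, pvF, hr]
      · rw [show fmtA_loop out (c :: cs) = fmtA_loop out cs by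
              simp only [fmtA_loop, ← hch]
              rw [if_neg (by simp_all), if_neg (by simp [hr])],
            show (c :: cs).map PySem.Chars.upperChar = ch :: cs.map PySem.Chars.upperChar by
              simp [hch],
            show pvKept seen (ch :: cs.map PySem.Chars.upperChar)
                = pvKept seen (cs.map PySem.Chars.upperChar) by
              simp [pvKept, hd, hr]]
        exact ih out seen hinv

-- B's enumerate/index filter computes the same kept list
lemma kept_filter_eq (cs : List Char) :
    ∀ (p : List Char) seen, (∀ c, PySem.Chars.isIn [c] ['R', 'B', 'S'] = true → (c ∈ seen ↔ c ∈ p)) →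
    (((PySem.List.enumerate cs (p.length : Int)).filter (fun q =>
        PySem.Chars.isdigit q.2 ||
          (PySem.Chars.isIn [q.2] ['R', 'B', 'S'] &&
            ((PySem.List.index? (p ++ cs) q.2).map (fun n => (n : Int)) == some q.1)))).map (fun q => q.2))
      = pvKept seen cs := by
  induction cs with
  | nil => intro p seen _; simp [PySem.List.enumerate_nil, pvKept]
  | cons c cs ih =>
    intro p seen hinv
    have hsplit : p ++ c :: cs = (p ++ [c]) ++ cs := by simp
    have hlen : ((p ++ [c]).length : Int) = (p.length : Int) + 1 := by simp
    by_cases hd : PySem.Chars.isdigit c = true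
    · rw [PySem.List.enumerate_cons, List.filter_cons_of_pos (by simp [hd]),
          List.map_cons,
          show pvKept seen (c :: cs) = c :: pvKept seen cs by simp [pvKept, hd]]
      have := ih (p ++ [c]) seen (by
        intro d hdR
        have : d ≠ c := by
          rintro rfl
          exact isdigit_not_rbs d hd (by simpa using (isIn_singleton d _).mp hdR)
        simp [this, hinv d hdR])
      rw [hlen] at this
      rw [← hsplit] at this
      rw [this]
    · by_cases hr : PySem.Chars.isIn [c] ['R', 'B', 'S'] = true
      · by_cases hs : c ∈ seen
        · -- duplicate letter: index points strictly before p.length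
          have hcp : c ∈ p := (hinv c hr).mp hs
          have hidx : PySem.List.index? (p ++ c :: cs) c = PySem.List.index? p c :=
            PySem.List.index?_append_of_mem _ hcp
          obtain ⟨k, hk⟩ : ∃ k, PySem.List.index? p c = some k := by
            have := (PySem.List.index?_isSome_iff (xs := p) (v := c)).mpr hcp
            exact Option.isSome_iff_exists.mp this
          obtain ⟨pre, suf, hpeq, hpre, _⟩ := (PySem.List.index?_eq_some_iff p c k).mp hk
          have hklt : k < p.length := by
            subst hpeq; rw [← hpre]; simp
          rw [PySem.List.enumerate_cons, List.filter_cons_of_neg (by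
                simp only []
                rw [hidx, hk]
                simp [hd]
                omega),
              show pvKept seen (c :: cs) = pvKept seen cs by simp [pvKept, hd, hs]]
          have := ih (p ++ [c]) seen (by
            intro d hdR
            by_cases hdc : d = c
            · subst hdc; simp [hinv d hdR, hcp]
            · simp [hdc, hinv d hdR])
          rw [hlen] at this
          rw [← hsplit] at this
          rw [this]
        · -- first occurrence: index is exactly p.length
          have hcp : c ∉ p := fun h => hs ((hinv c hr).mpr h)
          have hidx : PySem.List.index? (p ++ c :: cs) c = some p.length :=
            (PySem.List.index?_eq_some_iff (p ++ c :: cs) c p.length).mpr ⟨p, cs, rfl, rfl, hcp⟩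
          rw [PySem.List.enumerate_cons, List.filter_cons_of_pos (by rw [hidx]; simp [hr]),
              List.map_cons,
              show pvKept seen (c :: cs) = c :: pvKept (c :: seen) cs by
                simp [pvKept, hd, hr, hs]]
          have := ih (p ++ [c]) (c :: seen) (by
            intro d hdR
            by_cases hdc : d = c
            · subst hdc; simp
            · simp [hdc, hinv d hdR])
          rw [hlen] at this
          rw [← hsplit] at this
          rw [this]
      · rw [PySem.List.enumerate_cons, List.filter_cons_of_neg (by simp [hd, hr]),
            show pvKept seen (c :: cs) = pvKept seen cs by simp [pvKept, hd, hr]]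
        have := ih (p ++ [c]) seen (by
          intro d hdR
          have : d ≠ c := by rintro rfl; exact hr hdR
          simp [this, hinv d hdR])
        rw [hlen] at this
        rw [← hsplit] at this
        rw [this]

-- every kept char is a digit or an R/B/S letter (so never '/')
lemma pvKept_sound (cs : List Char) :
    ∀ seen c, c ∈ pvKept seen cs →
      PySem.Chars.isdigit c = true ∨ PySem.Chars.isIn [c] ['R', 'B', 'S'] = true := by
  induction cs with
  | nil => intro seen c h; simp [pvKept] at h
  | cons x cs ih =>
    intro seen c h
    by_cases hd : PySem.Chars.isdigit x = true
    · rw [show pvKept seen (x :: cs) = x :: pvKept seen cs by simp [pvKept, hd]] at h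
      rcases List.mem_cons.mp h with rfl | h
      · exact Or.inl hd
      · exact ih seen c h
    · by_cases hg : (PySem.Chars.isIn [x] ['R', 'B', 'S'] && !(decide (x ∈ seen))) = true
      · rw [show pvKept seen (x :: cs) = x :: pvKept (x :: seen) cs by
              simp only [pvKept]; rw [if_neg (by simp_all), if_pos hg]] at h
        rcases List.mem_cons.mp h with rfl | h
        · exact Or.inr (Bool.and_eq_true .. |>.mp hg).1
        · exact ih (x :: seen) c h
      · rw [show pvKept seen (x :: cs) = pvKept seen cs by
              simp only [pvKept]; rw [if_neg (by simp_all), if_neg hg]] at h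
        exact ih seen c h

-- B's positional emit over the tail (indices ≥ 1) coincides with pvF
lemma emit_tail_eq (K : List Char) :
    ∀ (k : Int), 1 ≤ k →
    (PySem.List.enumerate K k).flatMap (fun p =>
        if 0 < p.1 && PySem.Chars.isIn [p.2] ['R', 'B', 'S'] then '/' :: [p.2] else [p.2])
      = K.flatMap pvF := by
  induction K with
  | nil => intro k _; simp [PySem.List.enumerate_nil]
  | cons c cs ih =>
    intro k hk
    rw [PySem.List.enumerate_cons, List.flatMap_cons, List.flatMap_cons,
        ih (k + 1) (by omega)]
    have h0 : (decide (0 < k)) = true := by simp; omega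
    simp only [h0, Bool.true_and, pvF]

-- ===== VERDICT (by name: the statement is the Claim_ definition above) =====
theorem format_text_to_rule_spec : Claim_equal_format_text_to_rule := by
  intro text _
  unfold Spec_format_text_to_rule
  simp only [format_text_to_rule, format_text_to_rule_alt]
  have hs : (PySem.Str.upper text).toList = text.toList.map PySem.Chars.upperChar := by
    simp [PySem.Str.toList_upper, PySem.Chars.upper]
  obtain ⟨K, hK⟩ : ∃ u, u = pvKept [] (text.toList.map PySem.Chars.upperChar) := ⟨_, rfl⟩
  have hA : fmtA_loop [] text.toList = K.flatMap pvF := by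
    rw [fmtA_loop_eq text.toList [] [] (by simp), ← hK]; simp
  have hB : (((PySem.List.enumerate ((PySem.Str.upper text).toList)).filter (fun p =>
      PySem.Chars.isdigit p.2 ||
        (PySem.Chars.isIn [p.2] ['R', 'B', 'S'] &&
          ((PySem.List.index? ((PySem.Str.upper text).toList) p.2).map (fun n => (n : Int))
            == some p.1)))).map (fun p => p.2)) = K := by
    have := kept_filter_eq (text.toList.map PySem.Chars.upperChar) [] [] (by simp)
    rw [← hK] at this
    simpa [hs] using this
  rw [hA, hB]
  cases hKc : K with
  | nil => simp [PySem.List.enumerate_nil]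
  | cons c rest =>
    have hc : PySem.Chars.isdigit c = true ∨ PySem.Chars.isIn [c] ['R', 'B', 'S'] = true := by
      apply pvKept_sound _ [] c
      rw [← hK, hKc]; simp
    rw [PySem.List.enumerate_cons, List.flatMap_cons, List.flatMap_cons,
        show (0 : Int) + 1 = 1 from rfl, emit_tail_eq rest 1 (by omega)]
    by_cases hr : PySem.Chars.isIn [c] ['R', 'B', 'S'] = true
    · rw [show pvF c = ['/', c] by simp [pvF, hr]]
      have hg : PySem.List.pyGet? (['/', c] ++ List.flatMap pvF rest) 0 = some '/' := by
        rw [show ((0 : Int)) = ((0 : Nat) : Int) by simp, PySem.List.pyGet?_natCast]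
        rfl
      rw [if_pos (by rw [hg]; simp)]
      rw [show (['/', c] ++ List.flatMap pvF rest) = '/' :: (c :: List.flatMap pvF rest) from rfl,
          PySem.List.slice_from_one]
      simp [hr]
    · have hd : PySem.Chars.isdigit c = true := hc.resolve_right hr
      have hcs : c ≠ '/' := by
        rintro rfl; simp [PySem.Chars.isdigit] at hd
      rw [show pvF c = [c] by simp [pvF, hr]]
      have hg : PySem.List.pyGet? ([c] ++ List.flatMap pvF rest) 0 = some c := by
        rw [show ((0 : Int)) = ((0 : Nat) : Int) by simp, PySem.List.pyGet?_natCast]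
        rfl
      rw [if_neg (by rw [hg]; simp [hcs])]
      simp [hr]
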